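-- pv_equiv track=rewrite | github.com/Lucas-Gui/OpenNMT-tf | scripts/tweak_attn/analyze_attn_dep.py | get_rarest
-- ===== SOURCE A (Python) =====
-- def get_rarest(freq, tokens):
--     """freq : number of occurences"""
--     l=[1] #0 is <S>
--     f=freq[tokens[1]] if tokens[1] in freq else 0
--     for i in range(2,len(tokens)):
--         f2 = freq[tokens[i]] if tokens[i] in freq else 0
--         if f2 < f:
--             f = f2
--             l=[i]
--         elif f2 == f:
--             l.append(i)
--     return l
-- ===== SOURCE B (Python) =====
-- def get_rarest(freq, tokens):
--     """freq : number of occurences"""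
--     idxs = range(1, len(tokens))
--     freqs = [freq.get(tokens[i], 0) for i in idxs]
--     m = min(freqs)
--     return [i for i, f in zip(idxs, freqs) if f == m]
-- ===== Notes on version B (the rewrite author's own statement) =====
-- stated objective: simpler
-- what changed: Replaces A's running-minimum loop that rebuilds/extends the index list in flight with a two-pass decomposition: build the frequency list once, take min(), then a comprehension collects the indices that attain it.
-- outside the precondition, e.g. on get_rarest({'a': 1}, ['x']): A raises IndexError, B raises ValueError
import Mathlib
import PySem

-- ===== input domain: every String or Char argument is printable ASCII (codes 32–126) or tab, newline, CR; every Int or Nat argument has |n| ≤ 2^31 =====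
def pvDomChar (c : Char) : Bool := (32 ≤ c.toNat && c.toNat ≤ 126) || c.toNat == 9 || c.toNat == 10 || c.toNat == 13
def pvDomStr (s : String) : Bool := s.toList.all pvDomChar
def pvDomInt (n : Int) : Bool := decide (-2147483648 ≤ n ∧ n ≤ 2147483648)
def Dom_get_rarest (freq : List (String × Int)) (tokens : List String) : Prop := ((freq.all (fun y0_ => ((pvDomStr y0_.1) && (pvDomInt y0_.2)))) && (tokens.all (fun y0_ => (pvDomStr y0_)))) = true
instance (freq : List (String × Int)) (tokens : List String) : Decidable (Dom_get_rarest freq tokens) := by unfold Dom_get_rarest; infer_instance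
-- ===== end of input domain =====

-- B changes A's single running-minimum scan into a two-pass decomposition (frequency list, min, comprehension); equivalence of return values on len(tokens) ≥ 2.

-- ===== PORT A =====
-- running-min loop: l=[1]; f=freq of tokens[1]; for i in range(2,len(tokens)): reset/append
def get_rarest (freq : List (String × Int)) (tokens : List String) : List Int :=
  match PySem.List.pyGet? tokens 1 with
  | none => []  -- IndexError (len(tokens) < 2); excluded by Pre_get_rarest
  | some t1 =>
    ((PySem.List.pyRange 2 (tokens.length : Int) 1).foldl
      (fun (st : List Int × Int) (i : Int) =>
        let f2 : Int := (PySem.Dict.mk freq).getD (PySem.List.pyGetD tokens i "") 0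
        if f2 < st.2 then ([i], f2)
        else if f2 = st.2 then (st.1 ++ [i], st.2)
        else st)
      ([(1 : Int)], (PySem.Dict.mk freq).getD t1 0)).1

-- ===== PORT B =====
-- two passes: freqs = [freq.get(tokens[i],0) for i in range(1,len)]; m = min(freqs); indices where f == m
def get_rarest_alt (freq : List (String × Int)) (tokens : List String) : List Int :=
  match PySem.List.min? ((PySem.List.pyRange 1 (tokens.length : Int) 1).map
      (fun i => (PySem.Dict.mk freq).getD (PySem.List.pyGetD tokens i "") 0)) (fun y => y) with
  | none => []  -- ValueError (min of empty list); excluded by Pre_get_rarest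
  | some m =>
    (((PySem.List.pyRange 1 (tokens.length : Int) 1).zip
        ((PySem.List.pyRange 1 (tokens.length : Int) 1).map
          (fun i => (PySem.Dict.mk freq).getD (PySem.List.pyGetD tokens i "") 0))).filter
      (fun p => decide (p.2 = m))).map (fun p => p.1)

-- ===== PRECONDITION & SPEC =====
-- Pre_ excludes len(tokens) < 2, where A raises IndexError on tokens[1] (and B raises ValueError on min of an empty list).
def Pre_get_rarest (freq : List (String × Int)) (tokens : List String) : Prop := 2 ≤ tokens.length
instance (freq : List (String × Int)) (tokens : List String) : Decidable (Pre_get_rarest freq tokens) := by unfold Pre_get_rarest; infer_instance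
def pvWitness_get_rarest : (List (String × Int)) × List String := ([("a", 1), ("b", 2)], ["x", "a", "b", "a"])
def Spec_get_rarest (freq : List (String × Int)) (tokens : List String) (out : List Int) : Prop := out = get_rarest_alt freq tokens
instance (freq : List (String × Int)) (tokens : List String) (out : List Int) : Decidable (Spec_get_rarest freq tokens out) := by unfold Spec_get_rarest; infer_instance

-- ===== CLAIM (what is proved, stated in full; the proofs are below) =====
def Claim_equal_get_rarest : Prop := ∀ (freq : List (String × Int)) (tokens : List String), Dom_get_rarest freq tokens → Pre_get_rarest freq tokens → Spec_get_rarest freq tokens (get_rarest freq tokens)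

-- ===== LEMMAS AND PROOFS =====

-- A's loop body, as a step over (index, frequency) pairs
def pvStep (st : List Int × Int) (p : Int × Int) : List Int × Int :=
  if p.2 < st.2 then ([p.1], p.2)
  else if p.2 = st.2 then (st.1 ++ [p.1], st.2)
  else st

theorem pv_foldl_min_le (l : List Int) (a : Int) : l.foldl min a ≤ a := by
  induction l generalizing a with
  | nil => exact le_refl a
  | cons b l ih => exact le_trans (ih (min a b)) (min_le_left a b)

-- characterisation of A's running-min fold: final min, and the indices attaining it
theorem pv_fold_char (ps : List (Int × Int)) (l0 : List Int) (f0 : Int) :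
    ps.foldl pvStep (l0, f0) =
      ((if f0 = (ps.map Prod.snd).foldl min f0 then l0 else []) ++
        (ps.filter (fun p => decide (p.2 = (ps.map Prod.snd).foldl min f0))).map Prod.fst,
       (ps.map Prod.snd).foldl min f0) := by
  induction ps generalizing l0 f0 with
  | nil => simp
  | cons p ps ih =>
    obtain ⟨i, fi⟩ := p
    simp only [List.foldl_cons, List.map_cons, List.filter_cons]
    by_cases h1 : fi < f0
    · have hmin : min f0 fi = fi := by omega
      have hM : (ps.map Prod.snd).foldl min fi ≤ fi := pv_foldl_min_le _ _
      rw [show pvStep (l0, f0) (i, fi) = ([i], fi) by simp [pvStep, h1], ih]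
      simp only [hmin]
      have hne : ¬ f0 = (ps.map Prod.snd).foldl min fi := by omega
      simp only [if_neg hne]
      by_cases h2 : fi = (ps.map Prod.snd).foldl min fi
      · rw [if_pos h2, if_pos (decide_eq_true h2)]; simp
      · rw [if_neg h2, if_neg (by simp [h2])]
    · by_cases h2 : fi = f0
      · subst h2
        have hmin : min fi fi = fi := by omega
        rw [show pvStep (l0, fi) (i, fi) = (l0 ++ [i], fi) by simp [pvStep], ih]
        simp only [hmin]
        by_cases h3 : fi = (ps.map Prod.snd).foldl min fi
        · rw [if_pos h3, if_pos h3, if_pos (decide_eq_true h3)]; simp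
        · rw [if_neg h3, if_neg h3, if_neg (by simp [h3])]
      · have hmin : min f0 fi = f0 := by omega
        have hM : (ps.map Prod.snd).foldl min f0 ≤ f0 := pv_foldl_min_le _ _
        rw [show pvStep (l0, f0) (i, fi) = (l0, f0) by simp [pvStep, h1, h2], ih]
        simp only [hmin]
        have hne : ¬ fi = (ps.map Prod.snd).foldl min f0 := by omega
        simp [hne]

-- zipping a list with a mapped copy of itself
theorem pv_zip_map_self {α β : Type} (l : List α) (g : α → β) :
    l.zip (l.map g) = l.map (fun a => (a, g a)) := by
  induction l with
  | nil => rfl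
  | cons a l ih => simp only [List.map_cons, List.zip_cons_cons, ih]

theorem get_rarest_spec_aux (freq : List (String × Int)) (tokens : List String)
    (hpre : 2 ≤ tokens.length) : get_rarest freq tokens = get_rarest_alt freq tokens := by
  have h1 : 1 < tokens.length := by omega
  have hget : PySem.List.pyGet? tokens 1 = some tokens[1] := by
    have := PySem.List.pyGet?_ofNat tokens 1 h1
    simpa using this
  set d := PySem.Dict.mk freq with hd
  set F : Int → Int := fun i => d.getD (PySem.List.pyGetD tokens i "") 0 with hF
  set r := PySem.List.pyRange 2 (tokens.length : Int) 1 with hr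
  set ps : List (Int × Int) := r.map (fun i => (i, F i)) with hps
  set M : Int := (r.map F).foldl min (F 1) with hM
  have hsnd : ps.map Prod.snd = r.map F := by
    simp [hps, List.map_map, Function.comp]
  have hf1 : d.getD (PySem.List.pyGetD tokens 1 "") 0 = d.getD tokens[1] 0 := by
    congr 1
    rw [show ((1 : Int)) = ((1 : Nat) : Int) by norm_num, PySem.List.pyGetD_natCast]
    simp [List.getD, h1]
  have hbody : (fun (st : List Int × Int) (i : Int) =>
      let f2 : Int := d.getD (PySem.List.pyGetD tokens i "") 0
      if f2 < st.2 then ([i], f2)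
      else if f2 = st.2 then (st.1 ++ [i], st.2)
      else st) = fun st i => pvStep st (i, F i) := by
    funext st i; simp [pvStep, hF]
  -- A rewritten as a pvStep-fold over index/frequency pairs
  have hA : get_rarest freq tokens = (ps.foldl pvStep ([(1 : Int)], F 1)).1 := by
    unfold get_rarest
    rw [hget]
    show ((r.foldl (fun (st : List Int × Int) (i : Int) =>
        let f2 : Int := d.getD (PySem.List.pyGetD tokens i "") 0
        if f2 < st.2 then ([i], f2)
        else if f2 = st.2 then (st.1 ++ [i], st.2)
        else st) ([(1 : Int)], d.getD tokens[1] 0)).1) = _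
    rw [hbody, hps, List.foldl_map]
    have : F 1 = d.getD tokens[1] 0 := by rw [hF]; exact hf1
    rw [this]
  -- B in the same terms
  have hidxs : PySem.List.pyRange 1 (tokens.length : Int) 1 = 1 :: r := by
    rw [PySem.List.pyRange_one_cons (by exact_mod_cast h1)]
    norm_num [hr]
  have hmapF : (1 :: r).map (fun i => d.getD (PySem.List.pyGetD tokens i "") 0)
      = F 1 :: r.map F := by simp [hF]
  have hB : get_rarest_alt freq tokens
      = ((if F 1 = M then [(1 : Int)] else []) ++
          (ps.filter (fun p => decide (p.2 = M))).map Prod.fst) := by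
    unfold get_rarest_alt
    rw [← hd, hidxs, hmapF, PySem.List.min?_id_cons, ← hM]
    show (((1 :: r).zip (F 1 :: r.map F)).filter (fun p => decide (p.2 = M))).map (fun p => p.1) = _
    rw [List.zip_cons_cons, pv_zip_map_self, ← hps, List.filter_cons]
    by_cases hc : F 1 = M
    · rw [if_pos (decide_eq_true hc), if_pos hc]
      simp
    · rw [if_neg (by simp [hc]), if_neg hc]
      simp
  rw [hA, pv_fold_char, hB, hsnd, ← hM]

-- ===== VERDICT (by name: the statement is the Claim_ definition above) =====
theorem get_rarest_spec : Claim_equal_get_rarest := by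
  intro freq tokens _ hpre
  exact get_rarest_spec_aux freq tokens hpre
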